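-- pv_equiv track=rewrite | github.com/ading2210/advent-of-code-2023 | 2023/day13/day13.py | horizontal_reflection
-- ===== SOURCE A (Python) =====
-- def horizontal_reflection(pattern):
--   valid = set()
--   for i, row in enumerate(pattern):
--     reflection_size = min(i, len(pattern)-i)
--     before = pattern[i-reflection_size:i]
--     after = pattern[i:i+reflection_size][::-1]
--
--     if before == after and reflection_size:
--       valid.add(i)
--
--   return valid
-- ===== SOURCE B (Python) =====
-- def _mirrors(pattern, l, r, s):
--   for _ in range(s):
--     if pattern[l] != pattern[r]:
--       return False
--     l -= 1
--     r += 1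
--   return True
--
-- def horizontal_reflection(pattern):
--   n = len(pattern)
--   valid = set()
--   for i in range(1, n):
--     if _mirrors(pattern, i - 1, i, min(i, n - i)):
--       valid.add(i)
--   return valid
-- ===== Notes on version B (the rewrite author's own statement) =====
-- stated objective: alternative
-- what changed: Instead of materialising two slices (one reversed) per candidate line and comparing them wholesale, B expands outward from each candidate line with two indices and stops comparing at the first mismatching row pair.
import Mathlib
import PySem

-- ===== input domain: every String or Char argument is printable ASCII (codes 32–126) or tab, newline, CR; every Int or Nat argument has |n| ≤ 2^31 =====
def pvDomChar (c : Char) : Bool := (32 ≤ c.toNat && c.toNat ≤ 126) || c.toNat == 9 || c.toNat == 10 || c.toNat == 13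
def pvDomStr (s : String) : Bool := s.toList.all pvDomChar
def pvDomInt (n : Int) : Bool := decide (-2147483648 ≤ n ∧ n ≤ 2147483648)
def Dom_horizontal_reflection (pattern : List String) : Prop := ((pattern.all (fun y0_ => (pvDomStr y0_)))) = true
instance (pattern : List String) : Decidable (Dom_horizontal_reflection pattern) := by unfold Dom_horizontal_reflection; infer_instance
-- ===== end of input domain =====

-- B replaces A's per-center slice building (two list slices, one reversed, compared wholesale)
-- by an outward two-pointer scan that stops at the first mismatching pair; return value only
-- (both build a fresh set; neither mutates its argument).

-- ===== PORT A =====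
-- literal port of Source A: for i,row in enumerate(pattern): compare pattern[i-s:i] with pattern[i:i+s][::-1]
def horizontal_reflection (pattern : List String) : List Int :=
  (PySem.List.enumerate pattern 0).foldl (fun valid p =>
    let i : Int := p.1
    let reflection_size : Int := min i ((pattern.length : Int) - i)
    let before := PySem.List.slice pattern (some (i - reflection_size)) (some i)
    let after := (PySem.List.slice? (PySem.List.slice pattern (some i) (some (i + reflection_size))) none none (-1)).getD []
    if before = after ∧ reflection_size ≠ 0 then PySem.Set.add valid i else valid)
    PySem.Set.empty

-- ===== PORT B =====
-- port of Source B's _mirrors: walk l leftwards and r rightwards for s steps, stop at the first mismatch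
def pvMirrors (pattern : List String) (l r s : Nat) : Bool :=
  match s with
  | 0 => true
  | s' + 1 =>
    if pattern.getD l "" ≠ pattern.getD r "" then false
    else pvMirrors pattern (l - 1) (r + 1) s'

def horizontal_reflection_alt (pattern : List String) : List Int :=
  let n := pattern.length
  (PySem.List.pyRange 1 (n : Int) 1).foldl (fun valid i =>
    if pvMirrors pattern (i.toNat - 1) i.toNat (min i.toNat (n - i.toNat)) then
      PySem.Set.add valid i
    else valid)
    PySem.Set.empty

-- ===== PRECONDITION & SPEC =====
def Spec_horizontal_reflection (pattern : List String) (out : List Int) : Prop := out = horizontal_reflection_alt pattern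
instance (pattern : List String) (out : List Int) : Decidable (Spec_horizontal_reflection pattern out) := by unfold Spec_horizontal_reflection; infer_instance

-- ===== CLAIM (what is proved, stated in full; the proofs are below) =====
def Claim_equal_horizontal_reflection : Prop := ∀ (pattern : List String), Dom_horizontal_reflection pattern → Spec_horizontal_reflection pattern (horizontal_reflection pattern)

-- ===== LEMMAS AND PROOFS =====

-- folding "if c i then add i" over a list of fresh, pairwise-distinct keys is filter-append
theorem pv_foldl_add_filter (c : Int → Prop) [DecidablePred c] (l acc : List Int)
    (hnd : l.Nodup) (hdisj : ∀ x ∈ l, x ∉ acc) :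
    l.foldl (fun a i => if c i then PySem.Set.add a i else a) acc
      = acc ++ l.filter (fun i => decide (c i)) := by
  induction l generalizing acc with
  | nil => simp
  | cons x l ih =>
    have hx : x ∉ acc := hdisj x (by simp)
    have hadd : PySem.Set.add acc x = acc ++ [x] := by
      simp [PySem.Set.add, PySem.Set.contains, hx]
    simp only [List.foldl_cons, List.filter_cons]
    rcases List.nodup_cons.mp hnd with ⟨hxl, hnd'⟩
    by_cases hc : c x
    · rw [if_pos hc, if_pos (by simpa using hc), hadd, ih (acc ++ [x]) hnd'
        (by intro y hy; simp; exact ⟨fun h => hdisj y (by simp [hy]) h, fun h => hxl (h ▸ hy)⟩)]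
      simp
    · rw [if_neg hc, if_neg (by simpa using hc), ih acc hnd' (fun y hy => hdisj y (by simp [hy]))]

-- pvMirrors is the pointwise palindrome test
theorem pvMirrors_iff (xs : List String) (l r s : Nat) :
    pvMirrors xs l r s = true ↔ ∀ k < s, xs.getD (l - k) "" = xs.getD (r + k) "" := by
  induction s generalizing l r with
  | zero => simp [pvMirrors]
  | succ s ih =>
    rw [pvMirrors]
    by_cases h : xs.getD l "" = xs.getD r ""
    · simp only [h, ne_eq, not_true_eq_false, if_false]
      rw [ih]
      constructor
      · intro H k hk
        cases k with
        | zero => simpa using h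
        | succ k =>
          have := H k (by omega)
          have e1 : l - (k+1) = l - 1 - k := by omega
          have e2 : r + (k+1) = r + 1 + k := by omega
          rw [e1, e2]; exact this
      · intro H k hk
        have := H (k+1) (by omega)
        have e1 : l - 1 - k = l - (k+1) := by omega
        have e2 : r + 1 + k = r + (k+1) := by omega
        rw [e1, e2]; exact this
    · simp only [h, ne_eq, not_false_eq_true, if_true]
      constructor
      · intro H; simp at H
      · intro H; exact absurd (by simpa using H 0 (by omega)) h

-- slice equality as the pointwise palindrome test
theorem pv_slice_eq_iff (xs : List String) (i s : Nat) (h1 : s ≤ i) (h2 : i + s ≤ xs.length) :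
    ((xs.drop (i - s)).take s = ((xs.drop i).take s).reverse)
      ↔ ∀ k < s, xs.getD (i - 1 - k) "" = xs.getD (i + k) "" := by
  have hlen1 : ((xs.drop (i - s)).take s).length = s := by
    simp [List.length_take, List.length_drop]; omega
  have hlen2 : (((xs.drop i).take s).reverse).length = s := by
    simp [List.length_take, List.length_drop]; omega
  have hmin : min s (xs.length - i) = s := by omega
  have hL : ∀ j (hj : j < s), ((xs.drop (i - s)).take s).getD j "" = xs.getD (i - s + j) "" := by
    intro j hj
    rw [List.getD_eq_getElem _ _ (by omega)]
    simp only [List.getElem_take, List.getElem_drop]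
    rw [List.getD_eq_getElem _ _ (by omega)]
  have hR : ∀ j (hj : j < s), (((xs.drop i).take s).reverse).getD j "" = xs.getD (i + (s - 1 - j)) "" := by
    intro j hj
    rw [List.getD_eq_getElem _ _ (by omega)]
    simp only [List.getElem_reverse, List.length_take, List.length_drop, hmin,
      List.getElem_take, List.getElem_drop]
    rw [List.getD_eq_getElem _ _ (by omega)]
  constructor
  · intro H k hk
    have := congrArg (fun t => t.getD (s - 1 - k) "") H
    simp only at this
    rw [hL _ (by omega), hR _ (by omega)] at this
    have e1 : i - s + (s - 1 - k) = i - 1 - k := by omega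
    have e2 : i + (s - 1 - (s - 1 - k)) = i + k := by omega
    rw [e1, e2] at this
    exact this
  · intro H
    apply List.ext_getElem (by omega)
    intro j hj hj'
    have hjs : j < s := by omega
    have := H (s - 1 - j) (by omega)
    rw [← List.getD_eq_getElem _ "" hj, ← List.getD_eq_getElem _ "" hj']
    rw [hL _ hjs, hR _ hjs]
    have e1 : i - s + j = i - 1 - (s - 1 - j) := by omega
    rw [e1]
    exact this

-- the two per-center conditions agree on every admitted center 1 ≤ i < n
theorem pv_cond_congr (pattern : List String) (i : Int)
    (h1 : 1 ≤ i) (h2 : i < (pattern.length : Int)) :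
    (decide (PySem.List.slice pattern (some (i - min i ((pattern.length : Int) - i))) (some i)
        = (PySem.List.slice? (PySem.List.slice pattern (some i) (some (i + min i ((pattern.length : Int) - i)))) none none (-1)).getD []
      ∧ min i ((pattern.length : Int) - i) ≠ 0))
    = pvMirrors pattern (i.toNat - 1) i.toNat (min i.toNat (pattern.length - i.toNat)) := by
  set n := pattern.length with hn
  set iN := i.toNat with hiN
  have hi : i = (iN : Int) := by omega
  set sN := min iN (n - iN) with hsN
  have hs : min i ((n : Int) - i) = (sN : Int) := by omega
  have hle1 : sN ≤ iN := by omega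
  have hle2 : iN + sN ≤ n := by omega
  have hpos : sN ≠ 0 := by omega
  have hbefore : PySem.List.slice pattern (some (i - min i ((n : Int) - i))) (some i)
      = (pattern.drop (iN - sN)).take sN := by
    rw [hs, hi]
    have : (iN : Int) - (sN : Int) = ((iN - sN : Nat) : Int) := by omega
    rw [this, PySem.List.slice_natCast]
    congr 1
    omega
  have hafter : PySem.List.slice pattern (some i) (some (i + min i ((n : Int) - i)))
      = (pattern.drop iN).take sN := by
    rw [hs, hi]
    have : (iN : Int) + (sN : Int) = ((iN + sN : Nat) : Int) := by omega
    rw [this, PySem.List.slice_natCast]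
    congr 1
    omega
  rw [hbefore, hafter, PySem.List.slice?_none_none_neg_one]
  simp only [Option.getD_some]
  by_cases hc : (pattern.drop (iN - sN)).take sN = ((pattern.drop iN).take sN).reverse
  · have hm : pvMirrors pattern (iN - 1) iN sN = true := by
      rw [pvMirrors_iff]
      exact (pv_slice_eq_iff pattern iN sN hle1 hle2).mp hc
    rw [hm]
    have hne : min i ((n : Int) - i) ≠ 0 := by omega
    simp [hc, hne]
  · have hm : pvMirrors pattern (iN - 1) iN sN = false := by
      rw [Bool.eq_false_iff, ne_eq, pvMirrors_iff]
      intro H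
      exact hc ((pv_slice_eq_iff pattern iN sN hle1 hle2).mpr H)
    rw [hm]
    simp [hc]

-- folding a function of the index only over enumerate is folding over the index range
theorem pv_foldl_enumerate_fst {α β : Type} (xs : List α) (s : Int) (g : β → Int → β) (init : β) :
    (PySem.List.enumerate xs s).foldl (fun a p => g a p.1) init
      = (PySem.List.pyRange s (s + xs.length) 1).foldl g init := by
  rw [← PySem.List.map_fst_enumerate, List.foldl_map]

-- ===== VERDICT (by name: the statement is the Claim_ definition above) =====
theorem horizontal_reflection_spec : Claim_equal_horizontal_reflection := by
  intro pattern _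
  unfold Spec_horizontal_reflection
  set n := pattern.length with hn
  have hA : horizontal_reflection pattern
      = (PySem.List.pyRange 0 (n : Int) 1).filter (fun i =>
          decide (PySem.List.slice pattern (some (i - min i ((n : Int) - i))) (some i)
            = (PySem.List.slice? (PySem.List.slice pattern (some i) (some (i + min i ((n : Int) - i)))) none none (-1)).getD []
          ∧ min i ((n : Int) - i) ≠ 0)) := by
    have h0 := pv_foldl_enumerate_fst pattern 0 (fun valid i =>
      if PySem.List.slice pattern (some (i - min i ((n : Int) - i))) (some i)
            = (PySem.List.slice? (PySem.List.slice pattern (some i) (some (i + min i ((n : Int) - i)))) none none (-1)).getD []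
          ∧ min i ((n : Int) - i) ≠ 0
        then PySem.Set.add valid i else valid) PySem.Set.empty
    have h1 : horizontal_reflection pattern = (PySem.List.pyRange 0 (0 + (n : Int)) 1).foldl (fun valid i =>
      if PySem.List.slice pattern (some (i - min i ((n : Int) - i))) (some i)
            = (PySem.List.slice? (PySem.List.slice pattern (some i) (some (i + min i ((n : Int) - i)))) none none (-1)).getD []
          ∧ min i ((n : Int) - i) ≠ 0
        then PySem.Set.add valid i else valid) PySem.Set.empty := h0
    rw [h1, zero_add]
    rw [pv_foldl_add_filter _ _ _ (PySem.List.nodup_pyRange_one _ _) (fun x _ hx => by simp [PySem.Set.empty] at hx)]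
    simp [PySem.Set.empty]
  have hB : horizontal_reflection_alt pattern
      = (PySem.List.pyRange 1 (n : Int) 1).filter (fun i =>
          decide (pvMirrors pattern (i.toNat - 1) i.toNat (min i.toNat (n - i.toNat)) = true)) := by
    unfold horizontal_reflection_alt
    rw [pv_foldl_add_filter _ _ _ (PySem.List.nodup_pyRange_one _ _) (fun x _ hx => by simp [PySem.Set.empty] at hx)]
    simp [PySem.Set.empty]
    rfl
  rw [hA, hB]
  by_cases hn0 : (n : Int) ≤ 0
  · rw [PySem.List.pyRange_one_eq_nil hn0, PySem.List.pyRange_one_eq_nil (by omega)]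
    rfl
  · rw [PySem.List.pyRange_one_cons (by omega : (0:Int) < (n : Int))]
    rw [List.filter_cons]
    have hz : ¬ (PySem.List.slice pattern (some ((0:Int) - min 0 ((n : Int) - 0))) (some 0)
            = (PySem.List.slice? (PySem.List.slice pattern (some (0:Int)) (some ((0:Int) + min 0 ((n : Int) - 0)))) none none (-1)).getD []
          ∧ min (0:Int) ((n : Int) - 0) ≠ 0) := by
      intro H
      exact H.2 (by omega)
    rw [if_neg (by simp only [decide_eq_true_eq]; exact hz)]
    apply List.filter_congr
    intro i hi
    rw [PySem.List.mem_pyRange_one] at hi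
    rw [pv_cond_congr pattern i hi.1 hi.2]
    simp
    rfl
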